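-- pv_equiv track=rewrite | github.com/gavetao/aed1 | 0124/1_valida_matriz.py | valida_matriz
-- ===== SOURCE A (Python) =====
-- def valida_matriz(M):
--     rows = len(M)  # linhas
--     cols = len(M[0])  # colunas
--     maxv = M[0][0]  # maior valor sendo o primeiro
--     sumd = 0  # soma das diagonais iniciada em zero
--     for r in range(rows):  # para cada linha
--         lenr = len(M[r])  # salva o numero de colunas da linha
--         if lenr != cols:  # se for diferente de alguma, é inválida
--             return "Esta não é uma matriz válida."
--         for c in range(cols):  # para cada coluna da linha
--             val = M[r][c]  # pega o valor naquela linha e coluna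
--             if r == c:  # se os índices forem iguais está na diagonal
--                 sumd += val  # soma a diagonal
--             if val > maxv:  # se for maior que o valor máximo
--                 maxv = val  # atribui o novo valor máximo
--     if rows == cols:  # confere se é matriz quadrada
--         return f"Matriz válida. O maior número é o {maxv}. O somatório da diagonal principal é {sumd}."
--     return f"Matriz válida. O maior número é o {maxv}."
-- ===== SOURCE B (Python) =====
-- def valida_matriz(M):
--     rows = len(M)
--     cols = len(M[0])
--     if any(len(r) != cols for r in M):
--         return "Esta não é uma matriz válida."
--     maxv = max(max(r) for r in M)
--     if rows == cols:
--         sumd = sum(M[i][i] for i in range(rows))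
--         return f"Matriz válida. O maior número é o {maxv}. O somatório da diagonal principal é {sumd}."
--     return f"Matriz válida. O maior número é o {maxv}."
-- ===== Notes on version B (the rewrite author's own statement) =====
-- stated objective: simpler
-- what changed: A's fused nested loop with running maxv/sumd accumulators and an early return is split into three independent passes: a validation pass with any(), the maximum via max(max(r) for r in M), and the diagonal sum computed only in the square branch via sum(M[i][i] ...); the builtin max/sum reductions give a constant-factor speedup.
import Mathlib
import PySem

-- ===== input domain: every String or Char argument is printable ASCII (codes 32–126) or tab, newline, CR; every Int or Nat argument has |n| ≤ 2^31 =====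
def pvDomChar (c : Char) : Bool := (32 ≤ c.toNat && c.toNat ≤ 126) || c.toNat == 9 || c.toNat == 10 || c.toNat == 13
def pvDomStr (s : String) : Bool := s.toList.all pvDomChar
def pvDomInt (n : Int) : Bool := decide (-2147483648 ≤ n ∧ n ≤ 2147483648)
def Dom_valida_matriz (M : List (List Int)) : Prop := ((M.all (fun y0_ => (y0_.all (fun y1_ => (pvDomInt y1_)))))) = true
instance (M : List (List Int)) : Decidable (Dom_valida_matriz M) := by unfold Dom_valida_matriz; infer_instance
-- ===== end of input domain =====

-- B replaces A's fused nested loop (running max + diagonal sum + early return) by three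
-- separate passes: validate with any(), take max(max(r) for r in M), and sum the diagonal
-- only in the square branch; same results, simpler decomposition.


-- ===== PORT A =====
-- A's outer `for r in range(rows)` walks the rows; ported as structural recursion over the
-- row list carrying the row index r and the (maxv, sumd) accumulators; the inner
-- `for c in range(cols)` is the foldl over List.range cols, updating both accumulators.
def validaLoop (rows cols : Nat) : List (List Int) → Nat → Int → Int → String
  | [], _r, maxv, sumd =>
      if rows = cols then
        "Matriz válida. O maior número é o " ++ PySem.Int.toStr maxv ++
          ". O somatório da diagonal principal é " ++ PySem.Int.toStr sumd ++ "."
      else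
        "Matriz válida. O maior número é o " ++ PySem.Int.toStr maxv ++ "."
  | row :: rest, r, maxv, sumd =>
      if row.length ≠ cols then "Esta não é uma matriz válida."
      else
        let p := (List.range cols).foldl
          (fun (p : Int × Int) (c : Nat) =>
            ((if PySem.List.pyGetD row (c : Int) 0 > p.1 then PySem.List.pyGetD row (c : Int) 0 else p.1),
             (if r = c then p.2 + PySem.List.pyGetD row (c : Int) 0 else p.2)))
          (maxv, sumd)
        validaLoop rows cols rest (r + 1) p.1 p.2

def valida_matriz (M : List (List Int)) : String :=
  let rows := M.length
  let cols := (PySem.List.pyGetD M (0 : Int) []).length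
  let maxv := PySem.List.pyGetD (PySem.List.pyGetD M (0 : Int) []) (0 : Int) 0
  validaLoop rows cols M 0 maxv 0

-- ===== PORT B =====
-- max(r) with no key = PySem.List.max? r id; the generator sums/maxes are map-then-reduce.
def valida_matriz_alt (M : List (List Int)) : String :=
  let rows := M.length
  let cols := (PySem.List.pyGetD M (0 : Int) []).length
  if M.any (fun r => r.length ≠ cols) then "Esta não é uma matriz válida."
  else
    let maxv := (PySem.List.max? (M.map (fun r => (PySem.List.max? r (fun y => y)).getD 0)) (fun y => y)).getD 0
    if rows = cols then
      let sumd := ((List.range rows).map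
        (fun (i : Nat) => PySem.List.pyGetD (PySem.List.pyGetD M (i : Int) []) (i : Int) 0)).sum
      "Matriz válida. O maior número é o " ++ PySem.Int.toStr maxv ++
        ". O somatório da diagonal principal é " ++ PySem.Int.toStr sumd ++ "."
    else
      "Matriz válida. O maior número é o " ++ PySem.Int.toStr maxv ++ "."

-- ===== PRECONDITION & SPEC =====
-- Pre_ excludes exactly the inputs where A raises IndexError: the empty matrix (len(M[0]))
-- and a matrix whose first row is empty (M[0][0]).
def Pre_valida_matriz (M : List (List Int)) : Prop := M ≠ [] ∧ M.headD [] ≠ []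
instance (M : List (List Int)) : Decidable (Pre_valida_matriz M) := by unfold Pre_valida_matriz; infer_instance
def pvWitness_valida_matriz : List (List Int) := [[1, 2], [3, 4]]

def Spec_valida_matriz (M : List (List Int)) (out : String) : Prop := out = valida_matriz_alt M
instance (M : List (List Int)) (out : String) : Decidable (Spec_valida_matriz M out) := by unfold Spec_valida_matriz; infer_instance

-- ===== CLAIM (what is proved, stated in full; the proofs are below) =====
def Claim_equal_valida_matriz : Prop := ∀ (M : List (List Int)), Dom_valida_matriz M → Pre_valida_matriz M → Spec_valida_matriz M (valida_matriz M)

-- ===== LEMMAS AND PROOFS =====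

-- peel the first row element off an indexed fold over range
lemma pvFoldShift {σ : Type} (x : Int) (t : List Int) (f : σ → Nat → Int → σ) (init : σ) :
    (List.range (t.length + 1)).foldl (fun s (c : Nat) => f s c (PySem.List.pyGetD (x :: t) (c : Int) 0)) init
      = (List.range t.length).foldl (fun s (c : Nat) => f s (c + 1) (PySem.List.pyGetD t (c : Int) 0)) (f init 0 x) := by
  rw [List.range_succ_eq_map, List.foldl_cons, List.foldl_map]
  have h0 : f init 0 (PySem.List.pyGetD (x :: t) ((0 : Nat) : Int) 0) = f init 0 x := by
    rw [PySem.List.pyGetD_natCast, List.getD_cons_zero]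
  rw [h0]
  apply List.foldl_ext
  intro s c _
  rw [PySem.List.pyGetD_natCast, PySem.List.pyGetD_natCast, Nat.succ_eq_add_one, List.getD_cons_succ]

-- the max accumulated by A over one row is a plain running max
lemma pvInnerMax (row : List Int) : ∀ (maxv : Int),
    (List.range row.length).foldl
      (fun (m : Int) (c : Nat) => if PySem.List.pyGetD row (c : Int) 0 > m then PySem.List.pyGetD row (c : Int) 0 else m)
      maxv = row.foldl max maxv := by
  induction row with
  | nil => intro maxv; rfl
  | cons x t ih =>
      intro maxv
      rw [List.length_cons]
      have h := pvFoldShift x t (fun m _ v => if v > m then v else m) maxv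
      simp only [] at h
      rw [h, ih]
      have hmax : (if x > maxv then x else maxv) = max maxv x := by
        rw [max_def]; split_ifs <;> omega
      rw [hmax, List.foldl_cons]

-- the diagonal contribution A accumulates over one row
lemma pvInnerSum (row : List Int) : ∀ (r : Nat) (sumd : Int),
    (List.range row.length).foldl
      (fun (s : Int) (c : Nat) => if r = c then s + PySem.List.pyGetD row (c : Int) 0 else s) sumd
      = sumd + (if r < row.length then row.getD r 0 else 0) := by
  induction row with
  | nil => intro r sumd; simp
  | cons x t ih =>
      intro r sumd
      rw [List.length_cons]
      have h := pvFoldShift x t (fun s c v => if r = c then s + v else s) sumd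
      simp only [] at h
      rw [h]
      cases r with
      | zero =>
          rw [if_pos rfl]
          have hz : (List.range t.length).foldl
              (fun (s : Int) (c : Nat) => if 0 = c + 1 then s + PySem.List.pyGetD t (c : Int) 0 else s)
              (sumd + x) = sumd + x := by
            rw [List.foldl_ext (g := fun (s : Int) (_ : Nat) => s)]
            · exact List.foldl_fixed _
            · intro s c _; rw [if_neg (by omega)]
          rw [hz, if_pos (by omega), List.getD_cons_zero]
      | succ k =>
          rw [if_neg (by omega)]
          rw [List.foldl_ext
            (g := fun (s : Int) (c : Nat) => if k = c then s + PySem.List.pyGetD t (c : Int) 0 else s)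
            (l := List.range t.length)]
          · rw [ih k sumd]
            by_cases hk : k < t.length
            · rw [if_pos hk, if_pos (by simpa using Nat.succ_lt_succ hk), List.getD_cons_succ]
            · rw [if_neg hk, if_neg (by omega)]
          · intro s c _
            by_cases hc : k = c
            · subst hc; rw [if_pos rfl, if_pos rfl]
            · rw [if_neg (by omega), if_neg hc]

-- overall running max of A
def pvAmax (L : List (List Int)) (m : Int) : Int := L.foldl (fun m row => row.foldl max m) m

-- overall diagonal sum of A (offset r = index of the first row of L in M)
def pvDsum : List (List Int) → Nat → Nat → Int
  | [], _, _ => 0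
  | row :: rest, r, cols => (if r < cols then row.getD r 0 else 0) + pvDsum rest (r + 1) cols

lemma pvOuterInvalid (rows cols : Nat) : ∀ (L : List (List Int)) (r : Nat) (maxv sumd : Int),
    (∃ row ∈ L, row.length ≠ cols) →
    validaLoop rows cols L r maxv sumd = "Esta não é uma matriz válida." := by
  intro L
  induction L with
  | nil => intro r maxv sumd h; simp at h
  | cons row rest ih =>
      intro r maxv sumd h
      by_cases hlen : row.length ≠ cols
      · simp [validaLoop, hlen]
      · rw [validaLoop, if_neg (by simpa using hlen)]
        apply ih
        rcases h with ⟨w, hw, hne⟩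
        rcases List.mem_cons.mp hw with h1 | h1
        · exact absurd (h1 ▸ hne) hlen
        · exact ⟨w, h1, hne⟩

lemma pvOuterValid (rows cols : Nat) : ∀ (L : List (List Int)) (r : Nat) (maxv sumd : Int),
    (∀ row ∈ L, row.length = cols) →
    validaLoop rows cols L r maxv sumd =
      (if rows = cols then
        "Matriz válida. O maior número é o " ++ PySem.Int.toStr (pvAmax L maxv) ++
          ". O somatório da diagonal principal é " ++ PySem.Int.toStr (sumd + pvDsum L r cols) ++ "."
      else
        "Matriz válida. O maior número é o " ++ PySem.Int.toStr (pvAmax L maxv) ++ ".") := by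
  intro L
  induction L with
  | nil => intro r maxv sumd _; simp [validaLoop, pvAmax, pvDsum]
  | cons row rest ih =>
      intro r maxv sumd hall
      have hlen : row.length = cols := hall row (List.mem_cons_self ..)
      rw [validaLoop, if_neg (by simp [hlen])]
      rw [PySem.List.foldl_prod_mk
        (fun (m : Int) (c : Nat) => if PySem.List.pyGetD row (c : Int) 0 > m then PySem.List.pyGetD row (c : Int) 0 else m)
        (fun (s : Int) (c : Nat) => if r = c then s + PySem.List.pyGetD row (c : Int) 0 else s)]
      rw [ih (r + 1) _ _ (fun w hw => hall w (List.mem_cons_of_mem _ hw))]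
      rw [← hlen, pvInnerMax row maxv, pvInnerSum row r sumd]
      have hm : pvAmax rest (row.foldl max maxv) = pvAmax (row :: rest) maxv := rfl
      have hs : sumd + (if r < row.length then row.getD r 0 else 0) + pvDsum rest (r + 1) row.length
          = sumd + pvDsum (row :: rest) r row.length := by
        simp [pvDsum]; ring
      rw [hm, hs]

-- B's row maxima folded with max equal A's nested running max
lemma pvBmax (L : List (List Int)) : ∀ (m : Int), (∀ row ∈ L, row ≠ []) →
    (L.map (fun r => (PySem.List.max? r (fun y => y)).getD 0)).foldl max m = pvAmax L m := by
  induction L with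
  | nil => intro m _; rfl
  | cons row rest ih =>
      intro m hne
      obtain ⟨y, s, rfl⟩ := List.exists_cons_of_ne_nil (hne row (List.mem_cons_self ..))
      simp only [List.map_cons, List.foldl_cons, PySem.List.max?_id_cons, Option.getD_some]
      rw [ih (max m (s.foldl max y)) (fun w hw => hne w (List.mem_cons_of_mem _ hw))]
      have h : max m (s.foldl max y) = (y :: s).foldl max m := by
        rw [List.foldl_cons]
        exact (List.foldl_assoc).symm
      rw [h]; rfl

-- A's structural diagonal sum as B's absolute-index sum
lemma pvDsumEq (cols : Nat) : ∀ (L : List (List Int)) (r : Nat),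
    pvDsum L r cols =
      ((List.range L.length).map (fun (i : Nat) => if r + i < cols then (L.getD i []).getD (r + i) 0 else 0)).sum := by
  intro L
  induction L with
  | nil => intro r; simp [pvDsum]
  | cons row rest ih =>
      intro r
      rw [pvDsum, List.length_cons, List.range_succ_eq_map, List.map_cons, List.map_map, List.sum_cons]
      congr 1
      rw [ih (r + 1)]
      congr 1
      apply List.map_congr_left
      intro i _
      have h1 : r + (i + 1) = r + 1 + i := by omega
      simp only [Function.comp, Nat.succ_eq_add_one, h1, List.getD_cons_succ]

-- ===== VERDICT (by name: the statement is the Claim_ definition above) =====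
theorem valida_matriz_spec : Claim_equal_valida_matriz := by
  intro M _hDom hPre
  obtain ⟨hM, hHead⟩ := hPre
  obtain ⟨row0, rest, rfl⟩ := List.exists_cons_of_ne_nil hM
  obtain ⟨x, t, rfl⟩ := List.exists_cons_of_ne_nil (by simpa using hHead)
  unfold Spec_valida_matriz valida_matriz valida_matriz_alt
  simp only [PySem.List.pyGetD_ofNat', List.getD_cons_zero]
  by_cases hbad : ∃ row ∈ (x :: t) :: rest, row.length ≠ (x :: t).length
  · rw [pvOuterInvalid _ _ _ _ _ _ hbad]
    rw [if_pos (by simpa [List.any_eq_true] using hbad)]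
  · have hbad : ∀ row ∈ (x :: t) :: rest, row.length = (x :: t).length := by
      intro w hw
      by_contra hne
      exact hbad ⟨w, hw, hne⟩
    rw [pvOuterValid _ _ _ _ _ _ hbad]
    have hnotany : (((x :: t) :: rest).any fun r => decide (r.length ≠ (x :: t).length)) = false := by
      rw [List.any_eq_false]
      intro w hw
      simp [hbad w hw]
    rw [hnotany]
    simp only [Bool.false_eq_true, if_false]
    have hne : ∀ row ∈ (x :: t) :: rest, row ≠ [] := by
      intro row hrow h0
      have := hbad row hrow
      rw [h0] at this
      simp at this
    -- the max sides agree
    have hmax : (PySem.List.max? (((x :: t) :: rest).map (fun r => (PySem.List.max? r (fun y => y)).getD 0)) (fun y => y)).getD 0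
        = pvAmax ((x :: t) :: rest) x := by
      simp only [List.map_cons, PySem.List.max?_id_cons, Option.getD_some]
      rw [pvBmax rest _ (fun w hw => hne w (List.mem_cons_of_mem _ hw))]
      have h : t.foldl max x = (x :: t).foldl max x := by
        rw [List.foldl_cons, max_self]
      rw [h]; rfl
    rw [hmax]
    by_cases hsq : ((x :: t) :: rest).length = (x :: t).length
    · rw [if_pos hsq, if_pos hsq]
      have hsum : (0 : Int) + pvDsum ((x :: t) :: rest) 0 (x :: t).length
          = ((List.range ((x :: t) :: rest).length).map
              (fun (i : Nat) => PySem.List.pyGetD (PySem.List.pyGetD ((x :: t) :: rest) (i : Int) []) (i : Int) 0)).sum := by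
        rw [zero_add, pvDsumEq]
        congr 1
        apply List.map_congr_left
        intro i hi
        have hilt : i < ((x :: t) :: rest).length := List.mem_range.mp hi
        have hcond : 0 + i < (x :: t).length := by omega
        rw [if_pos hcond, PySem.List.pyGetD_natCast, PySem.List.pyGetD_natCast, Nat.zero_add]
      rw [hsum]
    · rw [if_neg hsq, if_neg hsq]
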